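-- pv_equiv track=rewrite | github.com/yimango/Competitive-Programming | ALTleetcode102.py | solution
-- ===== SOURCE A (Python) =====
-- def solution(inputTree):
--     returnTree = []
--
--     counter = 0
--     i = 0
--     while counter != len(inputTree):
--         tempSet = inputTree[counter : min(2**i + counter, len(inputTree))]
--         counter += min(2**i, len(inputTree) - counter)
--
--         while tempSet.count("null") > 0:
--             tempSet.remove("null")
--         returnTree.append(tempSet)
--         i+=1
--
--     return returnTree
-- ===== SOURCE B (Python) =====
-- def solution(inputTree):
--     buckets = []
--     for p, x in enumerate(inputTree):
--         level = (p + 1).bit_length() - 1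
--         while len(buckets) <= level:
--             buckets.append([])
--         if x != "null":
--             buckets[level].append(x)
--     return buckets
-- ===== Notes on version B (the rewrite author's own statement) =====
-- stated objective: alternative
-- what changed: Replaces A's level-by-level doubling-slice loop with repeated list.remove('null') by a single enumerate pass that buckets each element into level (p+1).bit_length()-1, skipping nulls as it goes; it trades A's slicing for per-element positional bucketing.
import Mathlib
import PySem

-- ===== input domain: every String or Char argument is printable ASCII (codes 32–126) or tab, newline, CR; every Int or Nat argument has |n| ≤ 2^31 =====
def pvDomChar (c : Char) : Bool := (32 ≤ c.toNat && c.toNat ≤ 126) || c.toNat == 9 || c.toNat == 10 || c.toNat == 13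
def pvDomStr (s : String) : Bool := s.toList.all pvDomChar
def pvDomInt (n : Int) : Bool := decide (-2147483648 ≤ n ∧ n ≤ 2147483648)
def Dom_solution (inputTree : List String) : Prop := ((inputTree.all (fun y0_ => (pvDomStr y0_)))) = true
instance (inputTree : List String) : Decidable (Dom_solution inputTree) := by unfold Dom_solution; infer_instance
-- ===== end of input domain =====

-- B replaces A's doubling-slice-then-remove loop by one bucketing pass over enumerate
-- using (p+1).bit_length()-1 (an alternative decomposition of the same computation).

-- ===== PORT A =====

-- termination helper for removeNulls (list.remove shortens the list)
theorem pvRemoveLen {l t : List String} (h : PySem.List.remove? l "null" = some t) :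
    t.length < l.length := by
  have hv : "null" ∈ l := by
    by_contra hn
    rw [(PySem.List.remove?_eq_none_iff l "null").mpr hn] at h
    simp at h
  rw [PySem.List.remove?_eq_some_erase l "null" hv] at h
  cases h
  have := List.length_erase_of_mem hv
  have : l ≠ [] := by rintro rfl; exact absurd hv (by simp)
  have : 0 < l.length := List.length_pos_iff.mpr this
  simp [List.length_erase_of_mem hv]
  omega

-- while tempSet.count("null") > 0: tempSet.remove("null")
def removeNulls (tempSet : List String) : List String :=
  if PySem.List.count tempSet "null" > 0 then
    match hr : PySem.List.remove? tempSet "null" with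
    | some t => removeNulls t
    | none => tempSet
  else tempSet
termination_by tempSet.length
decreasing_by exact pvRemoveLen hr

-- the outer while loop; counter, i are the Python loop variables (always nonnegative,
-- carried as Nat; counter ≤ len is an invariant of the loop, carried for termination)
def solLoop (inputTree : List String) (returnTree : List (List String)) (counter i : Nat)
    (h : counter ≤ inputTree.length) : List (List String) :=
  if hc : counter = inputTree.length then returnTree
  else
    let tempSet := PySem.List.slice inputTree (some (counter : Int))
      (some ((min (2 ^ i + counter) inputTree.length : Nat) : Int))
    solLoop inputTree (returnTree ++ [removeNulls tempSet])
      (counter + min (2 ^ i) (inputTree.length - counter)) (i + 1)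
      (by omega)
termination_by inputTree.length - counter
decreasing_by
  have h1 : 1 ≤ 2 ^ i := Nat.one_le_two_pow
  omega

def solution (inputTree : List String) : List (List String) :=
  solLoop inputTree [] 0 0 (Nat.zero_le _)

-- ===== PORT B =====

-- while len(buckets) <= level: buckets.append([])
def extendBuckets (buckets : List (List String)) (level : Nat) : List (List String) :=
  if buckets.length ≤ level then extendBuckets (buckets ++ [[]]) level else buckets
termination_by level + 1 - buckets.length
decreasing_by simp; omega

-- body of the for-loop over enumerate(inputTree)
def altStep (buckets : List (List String)) (p : Int) (x : String) : List (List String) :=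
  let level := PySem.Int.bitLength (p + 1) - 1
  let buckets := extendBuckets buckets level
  if x ≠ "null" then buckets.modify level (fun b => b ++ [x]) else buckets

def solution_alt (inputTree : List String) : List (List String) :=
  (PySem.List.enumerate inputTree).foldl (fun buckets px => altStep buckets px.1 px.2) []

-- ===== PRECONDITION & SPEC =====
def Spec_solution (inputTree : List String) (out : List (List String)) : Prop := out = solution_alt inputTree
instance (inputTree : List String) (out : List (List String)) : Decidable (Spec_solution inputTree out) := by unfold Spec_solution; infer_instance

-- ===== CLAIM (what is proved, stated in full; the proofs are below) =====
def Claim_equal_solution : Prop := ∀ (inputTree : List String), Dom_solution inputTree → Spec_solution inputTree (solution inputTree)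

-- ===== LEMMAS AND PROOFS =====

-- reference function: both ports compute this level decomposition
def chunkL (xs : List String) (i : Nat) : List (List String) :=
  if xs = [] then []
  else (xs.take (2 ^ i)).filter (· ≠ "null") :: chunkL (xs.drop (2 ^ i)) (i + 1)
termination_by xs.length
decreasing_by
  have h1 : 1 ≤ 2 ^ i := Nat.one_le_two_pow
  have : xs.length ≠ 0 := by simpa [List.length_eq_zero_iff] using ‹xs ≠ []›
  simp; omega

theorem filter_erase_null (l : List String) :
    (l.erase "null").filter (· ≠ "null") = l.filter (· ≠ "null") := by
  induction l with
  | nil => simp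
  | cons a l ih =>
    by_cases ha : a = "null"
    · subst ha; simp
    · simp [ha]
      simpa using ih

theorem removeNulls_eq_filter (l : List String) :
    removeNulls l = l.filter (· ≠ "null") := by
  induction l using removeNulls.induct with
  | case1 l h t hr ih =>
    rw [removeNulls, if_pos h, hr]
    have hv : "null" ∈ l := by
      rw [PySem.List.count_eq] at h
      exact List.count_pos_iff.mp h
    rw [PySem.List.remove?_eq_some_erase l "null" hv] at hr
    cases hr
    exact ih.trans (filter_erase_null l)
  | case2 l h hr =>
    have hv : "null" ∈ l := by
      rw [PySem.List.count_eq] at h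
      exact List.count_pos_iff.mp h
    exact absurd hv ((PySem.List.remove?_eq_none_iff l "null").mp hr)
  | case3 l h =>
    rw [removeNulls, if_neg h]
    have hv : "null" ∉ l := by
      rw [PySem.List.count_eq] at h
      simpa using h
    exact (List.filter_eq_self.mpr (fun a ha => by simp; rintro rfl; exact hv ha)).symm

theorem chunkL_nil (i : Nat) : chunkL [] i = [] := by rw [chunkL]; simp

theorem solLoop_eq (xs : List String) (acc : List (List String)) (counter i : Nat)
    (h : counter ≤ xs.length) :
    solLoop xs acc counter i h = acc ++ chunkL (xs.drop counter) i := by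
  rw [solLoop]
  by_cases hc : counter = xs.length
  · rw [dif_pos hc]
    simp [hc, List.drop_length, chunkL_nil]
  · rw [dif_neg hc]
    show solLoop xs (acc ++ [removeNulls (PySem.List.slice xs (some (counter : Int))
        (some ((min (2 ^ i + counter) xs.length : Nat) : Int)))])
        (counter + min (2 ^ i) (xs.length - counter)) (i + 1) _ = _
    rw [solLoop_eq xs _ _ _ _]
    have hlt : counter < xs.length := Nat.lt_of_le_of_ne h hc
    have h2 : 1 ≤ 2 ^ i := Nat.one_le_two_pow
    have hts : PySem.List.slice xs (some (counter : Int))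
        (some ((min (2 ^ i + counter) xs.length : Nat) : Int)) = (xs.drop counter).take (2 ^ i) := by
      rw [PySem.List.slice_natCast]
      by_cases hcase : 2 ^ i + counter ≤ xs.length
      · rw [Nat.min_eq_left hcase]
        congr 1
        omega
      · rw [Nat.min_eq_right (by omega)]
        rw [List.take_of_length_le (by simp), List.take_of_length_le (by simp; omega)]
    rw [hts]
    conv_rhs => rw [chunkL]
    rw [if_neg (by simp [List.drop_eq_nil_iff]; omega)]
    rw [List.drop_drop]
    rw [removeNulls_eq_filter]
    have hdrop : xs.drop (counter + min (2 ^ i) (xs.length - counter)) = xs.drop (2 ^ i + counter) := by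
      by_cases hcase : 2 ^ i ≤ xs.length - counter
      · rw [Nat.min_eq_left hcase]
        congr 1
        omega
      · rw [Nat.min_eq_right (by omega)]
        rw [List.drop_eq_nil_of_le (by omega), List.drop_eq_nil_of_le (by omega)]
    rw [hdrop, Nat.add_comm counter (2 ^ i)]
    simp
termination_by xs.length - counter
decreasing_by
  have h2 : 1 ≤ 2 ^ i := Nat.one_le_two_pow
  omega

theorem pow_mul_pred (i t : Nat) : 2 ^ i * (2 ^ t - 1) = 2 ^ (i + t) - 2 ^ i := by
  rw [Nat.mul_sub, mul_one, ← pow_add]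

theorem chunkL_len (t : Nat) : ∀ (i : Nat) (xs : List String),
    2 ^ i * (2 ^ t - 1) < xs.length → xs.length ≤ 2 ^ i * (2 ^ (t + 1) - 1) →
    (chunkL xs i).length = t + 1 := by
  induction t with
  | zero =>
    intro i xs h1 h2
    simp at h1
    rw [pow_mul_pred, show i + (0 + 1) = i + 1 from rfl] at h2
    have hA : 1 ≤ 2 ^ i := Nat.one_le_two_pow
    have hB : 2 ^ (i + 1) = 2 * 2 ^ i := by rw [pow_succ]; ring
    have hne : xs ≠ [] := by rintro rfl; simp at h1
    rw [chunkL, if_neg hne]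
    rw [List.drop_eq_nil_of_le (by omega), chunkL_nil]
    rfl
  | succ t ih =>
    intro i xs h1 h2
    rw [pow_mul_pred, show i + (t + 1) = i + t + 1 from rfl] at h1
    rw [pow_mul_pred, show i + (t + 1 + 1) = i + t + 2 from rfl] at h2
    have hA : 1 ≤ 2 ^ i := Nat.one_le_two_pow
    have hAB : 2 ^ i ≤ 2 ^ (i + t) := Nat.pow_le_pow_right (by norm_num) (by omega)
    have e2 : 2 ^ (i + t + 1) = 2 * 2 ^ (i + t) := by rw [pow_succ]; ring
    have e3 : 2 ^ (i + t + 2) = 2 * 2 ^ (i + t + 1) := by rw [pow_succ]; ring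
    have e4 : 2 ^ (i + 1) = 2 * 2 ^ i := by rw [pow_succ]; ring
    have hne : xs ≠ [] := by rintro rfl; simp at h1
    rw [chunkL, if_neg hne]
    simp only [List.length_cons]
    rw [ih (i + 1) (xs.drop (2 ^ i)) ?_ ?_]
    · rw [pow_mul_pred, List.length_drop, show i + 1 + t = i + t + 1 from by omega]
      omega
    · rw [pow_mul_pred, List.length_drop, show i + 1 + (t + 1) = i + t + 2 from by omega]
      omega

theorem chunkL_snoc_boundary (t : Nat) : ∀ (i : Nat) (xs : List String) (x : String),
    xs.length = 2 ^ i * (2 ^ t - 1) →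
    chunkL (xs ++ [x]) i = chunkL xs i ++ [List.filter (· ≠ "null") [x]] := by
  induction t with
  | zero =>
    intro i xs x hx
    simp at hx
    subst hx
    have hA : 1 ≤ 2 ^ i := Nat.one_le_two_pow
    simp only [List.nil_append, chunkL_nil]
    rw [chunkL, if_neg (by simp)]
    rw [List.take_of_length_le (by simp; omega), List.drop_eq_nil_of_le (by simp; omega), chunkL_nil]
  | succ t ih =>
    intro i xs x hx
    rw [pow_mul_pred, show i + (t + 1) = i + t + 1 from rfl] at hx
    have hA : 1 ≤ 2 ^ i := Nat.one_le_two_pow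
    have hAB : 2 ^ i ≤ 2 ^ (i + t) := Nat.pow_le_pow_right (by norm_num) (by omega)
    have e2 : 2 ^ (i + t + 1) = 2 * 2 ^ (i + t) := by rw [pow_succ]; ring
    have hAlen : 2 ^ i ≤ xs.length := by omega
    have hne : xs ≠ [] := by rintro rfl; simp at hAlen
    conv_lhs => rw [chunkL]
    rw [if_neg (show ¬(xs ++ [x] = []) by simp)]
    conv_rhs => rw [chunkL]
    rw [if_neg hne]
    rw [List.take_append_of_le_length hAlen, List.drop_append_of_le_length hAlen]
    rw [List.cons_append]
    congr 1
    rw [ih (i + 1) (xs.drop (2 ^ i)) x ?_]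
    rw [pow_mul_pred, List.length_drop, show i + 1 + t = i + t + 1 from by omega]
    omega

theorem chunkL_snoc_mid (t : Nat) : ∀ (i : Nat) (xs : List String) (x : String),
    2 ^ i * (2 ^ t - 1) < xs.length → xs.length < 2 ^ i * (2 ^ (t + 1) - 1) →
    chunkL (xs ++ [x]) i = (chunkL xs i).modify t (· ++ List.filter (· ≠ "null") [x]) := by
  induction t with
  | zero =>
    intro i xs x h1 h2
    simp at h1
    rw [pow_mul_pred, show i + (0 + 1) = i + 1 from rfl] at h2
    have hB : 2 ^ (i + 1) = 2 * 2 ^ i := by rw [pow_succ]; ring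
    have hA : 1 ≤ 2 ^ i := Nat.one_le_two_pow
    have hne : xs ≠ [] := by rintro rfl; simp at h1
    conv_lhs => rw [chunkL]
    rw [if_neg (show ¬(xs ++ [x] = []) by simp)]
    conv_rhs => rw [chunkL]
    rw [if_neg hne]
    rw [List.take_of_length_le (by simp; omega), List.take_of_length_le (by omega)]
    rw [List.drop_eq_nil_of_le (by simp; omega), List.drop_eq_nil_of_le (by omega), chunkL_nil]
    simp [List.filter_append]
  | succ t ih =>
    intro i xs x h1 h2
    rw [pow_mul_pred, show i + (t + 1) = i + t + 1 from rfl] at h1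
    rw [pow_mul_pred, show i + (t + 1 + 1) = i + t + 2 from rfl] at h2
    have hA : 1 ≤ 2 ^ i := Nat.one_le_two_pow
    have hAB : 2 ^ i ≤ 2 ^ (i + t) := Nat.pow_le_pow_right (by norm_num) (by omega)
    have e2 : 2 ^ (i + t + 1) = 2 * 2 ^ (i + t) := by rw [pow_succ]; ring
    have e3 : 2 ^ (i + t + 2) = 2 * 2 ^ (i + t + 1) := by rw [pow_succ]; ring
    have hAlen : 2 ^ i ≤ xs.length := by omega
    have hne : xs ≠ [] := by rintro rfl; simp at hAlen
    conv_lhs => rw [chunkL]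
    rw [if_neg (show ¬(xs ++ [x] = []) by simp)]
    conv_rhs => rw [chunkL]
    rw [if_neg hne]
    rw [List.take_append_of_le_length hAlen, List.drop_append_of_le_length hAlen]
    rw [List.modify_cons]
    rw [if_neg (Nat.succ_ne_zero t)]
    simp only [Nat.add_sub_cancel]
    congr 1
    rw [ih (i + 1) (xs.drop (2 ^ i)) x ?_ ?_]
    · rw [pow_mul_pred, List.length_drop, show i + 1 + t = i + t + 1 from by omega]
      omega
    · rw [pow_mul_pred, List.length_drop, show i + 1 + (t + 1) = i + t + 2 from by omega]
      omega

theorem modify_append_last {α : Type} (b : List α) (c : α) (f : α → α) :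
    (b ++ [c]).modify b.length f = b ++ [f c] := by
  induction b with
  | nil => simp
  | cons a b ih => simp [ih]

theorem extendBuckets_of_lt (b : List (List String)) (level : Nat) (h : level < b.length) :
    extendBuckets b level = b := by
  unfold extendBuckets; simp [Nat.not_le.mpr h]

theorem extendBuckets_of_eq (b : List (List String)) (level : Nat) (h : b.length = level) :
    extendBuckets b level = b ++ [[]] := by
  rw [extendBuckets]
  simp [h, extendBuckets_of_lt (b ++ [[]]) level (by simp [h])]

theorem altStep_chunk (xs : List String) (x : String) :
    altStep (chunkL xs 0) (xs.length : Int) x = chunkL (xs ++ [x]) 0 := by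
  have hcast : ((xs.length : Int) + 1) = (((xs.length + 1 : Nat)) : Int) := by push_cast; ring
  simp only [altStep]
  rw [hcast]
  set n := xs.length with hn
  set L := PySem.Int.bitLength (((n + 1 : Nat) : Int)) with hL
  have hub : n + 1 < 2 ^ L := by
    have h := PySem.Int.lt_two_pow_bitLength (((n + 1 : Nat) : Int))
    rw [← hL] at h
    simpa using h
  have hL1 : 1 ≤ L := by
    by_contra hc
    have : L = 0 := by omega
    rw [this] at hub
    omega
  have hlb : 2 ^ (L - 1) ≤ n + 1 := by
    have h := PySem.Int.two_pow_bitLength_le (((n + 1 : Nat) : Int)) (by exact_mod_cast Nat.succ_ne_zero n)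
    rw [← hL] at h
    simpa using h
  by_cases hb : n + 1 = 2 ^ (L - 1)
  · -- boundary: n = 2^(L-1) - 1, a new level starts at position n
    have hlen : (chunkL xs 0).length = L - 1 := by
      rcases Nat.eq_zero_or_pos (L - 1) with h0 | hpos
      · rw [h0] at hb
        have : xs = [] := by
          apply List.eq_nil_of_length_eq_zero
          omega
        rw [this, chunkL_nil, h0]
        rfl
      · have hpow : 2 ^ (L - 1 - 1) < 2 ^ (L - 1) := Nat.pow_lt_pow_right (by norm_num) (by omega)
        have hd : 1 ≤ 2 ^ (L - 1 - 1) := Nat.one_le_two_pow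
        have h := chunkL_len (L - 1 - 1) 0 xs
          (by simp only [pow_zero, one_mul]; omega)
          (by simp only [pow_zero, one_mul, show L - 1 - 1 + 1 = L - 1 from by omega]; omega)
        rw [h]
        omega
    rw [extendBuckets_of_eq _ _ hlen]
    rw [chunkL_snoc_boundary (L - 1) 0 xs x (by simp only [pow_zero, one_mul]; omega)]
    by_cases hx : x = "null"
    · rw [if_neg (by simp [hx])]
      simp [hx]
    · rw [if_pos (by simp [hx])]
      rw [← hlen, modify_append_last]
      simp [hx]
  · -- middle of a level
    have hpw : 2 ≤ 2 ^ (L - 1 + 1) := by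
      have : (1 : Nat) ≤ L - 1 + 1 := by omega
      calc 2 = 2 ^ 1 := by norm_num
        _ ≤ 2 ^ (L - 1 + 1) := Nat.pow_le_pow_right (by norm_num) this
    have hLe : L - 1 + 1 = L := by omega
    have hd : 1 ≤ 2 ^ (L - 1) := Nat.one_le_two_pow
    have hlen : (chunkL xs 0).length = L - 1 + 1 := by
      apply chunkL_len (L - 1) 0 xs
      · simp only [pow_zero, one_mul]
        omega
      · simp only [pow_zero, one_mul, hLe]
        omega
    rw [extendBuckets_of_lt _ _ (by omega)]
    rw [chunkL_snoc_mid (L - 1) 0 xs x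
      (by simp only [pow_zero, one_mul]; omega)
      (by simp only [pow_zero, one_mul, hLe]; omega)]
    by_cases hx : x = "null"
    · rw [if_neg (by simp [hx])]
      have hf : (fun b : List String => b ++ List.filter (· ≠ "null") [x]) = id := by
        funext b
        simp [hx]
      rw [hf, List.modify_id]
    · rw [if_pos (by simp [hx])]
      have hf : List.filter (· ≠ "null") [x] = [x] := by simp [hx]
      rw [hf]

theorem solution_alt_eq_chunk (xs : List String) : solution_alt xs = chunkL xs 0 := by
  induction xs using List.reverseRecOn with
  | nil => simp [solution_alt, PySem.List.enumerate, chunkL]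
  | append_singleton ys y ih =>
    unfold solution_alt
    rw [PySem.List.enumerate_append]
    rw [List.foldl_append]
    have : PySem.List.enumerate [y] ((0 : Int) + ys.length) = [((ys.length : Int), y)] := by
      simp [PySem.List.enumerate_cons, PySem.List.enumerate_nil]
    rw [this]
    simp only [List.foldl_cons, List.foldl_nil]
    rw [show (PySem.List.enumerate ys 0).foldl (fun buckets px => altStep buckets px.1 px.2) [] = solution_alt ys from rfl, ih]
    exact altStep_chunk ys y

-- ===== VERDICT (by name: the statement is the Claim_ definition above) =====
theorem solution_spec : Claim_equal_solution := by
  intro xs _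
  unfold Spec_solution solution
  rw [solLoop_eq xs [] 0 0 (Nat.zero_le _), solution_alt_eq_chunk]
  simp
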